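-- pv_equiv track=rewrite | github.com/jdannem6/Large-Language-Math-Model | PrecedenceEvaluator.py | __determine_nested_levels
-- ===== SOURCE A (Python) =====
-- def __determine_nested_levels(expression_str):
--     nested_levels_list = []
--     nested_level = 0
--     i = 0
--     end_index = -1 # We don't know where subexpression ends until reaching
--                    # the terminating parenthesis
--     while i < len(expression_str):
--         if expression_str[i] == '(':
--             start_idx = i
--             end_idx = -1
--             nested_levels_list.append(("", nested_level, start_idx, end_idx))
--             nested_level += 1
--         elif expression_str[i] == ')':
--             nested_level -= 1
--             start_index = None
--             for j in range(len(nested_levels_list) - 1, -1, -1):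
--                 if nested_levels_list[j][1] == nested_level:
--                     start_index = nested_levels_list[j][2]
--                     end_index = i
--                     nested_levels_list[j] = (expression_str[start_index:end_index+1], nested_level, start_index, end_index)
--                     break
--         i += 1
--     return nested_levels_list
-- ===== SOURCE B (Python) =====
-- def __determine_nested_levels(expression_str):
--     records = []
--     stack = []
--     nested_level = 0
--     for i, ch in enumerate(expression_str):
--         if ch == '(':
--             stack.append(len(records))
--             records.append(("", nested_level, i, -1))
--             nested_level += 1
--         elif ch == ')':
--             nested_level -= 1
--             if stack:
--                 j = stack.pop()
--                 start = records[j][2]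
--                 records[j] = (expression_str[start:i+1], nested_level, start, i)
--     return records
-- ===== Notes on version B (the rewrite author's own statement) =====
-- stated objective: faster
-- what changed: Replaces A's backward level-matching scan over the whole record list on every ')' with an index stack pushed on '(' and popped on ')', so each record is located in O(1).
import Mathlib
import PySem

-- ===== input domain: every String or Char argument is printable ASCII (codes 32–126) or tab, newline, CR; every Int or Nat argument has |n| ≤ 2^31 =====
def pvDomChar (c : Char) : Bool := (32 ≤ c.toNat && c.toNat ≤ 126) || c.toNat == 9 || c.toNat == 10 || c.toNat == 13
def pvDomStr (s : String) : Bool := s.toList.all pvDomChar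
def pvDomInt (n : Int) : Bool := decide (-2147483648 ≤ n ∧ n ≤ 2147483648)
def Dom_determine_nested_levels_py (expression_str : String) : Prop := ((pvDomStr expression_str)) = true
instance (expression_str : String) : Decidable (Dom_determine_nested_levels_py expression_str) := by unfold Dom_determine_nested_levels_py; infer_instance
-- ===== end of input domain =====

-- B replaces A's quadratic backward scan over the record list (on every ')') by an index
-- stack pushed on '(' and popped on ')': one pass, O(n) instead of O(n^2).

-- ===== PORT A =====
-- A's inner loop: for j in range(len(list)-1, -1, -1): if list[j][1]==lvl: fill list[j]; break.
-- Recursion tries the tail (higher indices) first, so the LAST matching record is filled.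
def pvFillA (s : List Char) (lvl : Int) (i : Int) :
    List (String × Int × Int × Int) → List (String × Int × Int × Int) × Bool
  | [] => ([], false)
  | r :: rest =>
    let res := pvFillA s lvl i rest
    if res.2 then (r :: res.1, true)
    else if r.2.1 = lvl then
      ((String.ofList (PySem.List.slice s (some r.2.2.1) (some (i + 1))), lvl, r.2.2.1, i) :: rest, true)
    else (r :: rest, false)

-- one iteration of A's while loop; state = (nested_levels_list, nested_level)
def pvStepA (s : List Char)
    (st : List (String × Int × Int × Int) × Int) (p : Int × Char) :
    List (String × Int × Int × Int) × Int :=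
  if p.2 = '(' then (st.1 ++ [("", st.2, p.1, -1)], st.2 + 1)
  else if p.2 = ')' then ((pvFillA s (st.2 - 1) p.1 st.1).1, st.2 - 1)
  else st

def determine_nested_levels_py (expression_str : String) : List (String × Int × Int × Int) :=
  ((PySem.List.enumerate expression_str.toList 0).foldl
      (pvStepA expression_str.toList) ([], 0)).1

-- ===== PORT B =====
-- one iteration of B's loop; state = (records, nested_level, stack of record indices)
def pvStepB (s : List Char)
    (st : List (String × Int × Int × Int) × Int × List Nat) (p : Int × Char) :
    List (String × Int × Int × Int) × Int × List Nat :=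
  if p.2 = '(' then (st.1 ++ [("", st.2.1, p.1, -1)], st.2.1 + 1, st.1.length :: st.2.2)
  else if p.2 = ')' then
    match st.2.2 with
    | [] => (st.1, st.2.1 - 1, [])
    | j :: rest =>
      let start := (st.1.getD j ("", 0, 0, 0)).2.2.1
      (st.1.set j (String.ofList (PySem.List.slice s (some start) (some (p.1 + 1))),
          st.2.1 - 1, start, p.1), st.2.1 - 1, rest)
  else st

def determine_nested_levels_py_alt (expression_str : String) : List (String × Int × Int × Int) :=
  ((PySem.List.enumerate expression_str.toList 0).foldl
      (pvStepB expression_str.toList) ([], 0, [])).1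

-- ===== PRECONDITION & SPEC =====
def Spec_determine_nested_levels_py (expression_str : String) (out : List (String × Int × Int × Int)) : Prop := out = determine_nested_levels_py_alt expression_str
instance (expression_str : String) (out : List (String × Int × Int × Int)) : Decidable (Spec_determine_nested_levels_py expression_str out) := by unfold Spec_determine_nested_levels_py; infer_instance

-- ===== CLAIM (what is proved, stated in full; the proofs are below) =====
def Claim_equal_determine_nested_levels_py : Prop := ∀ (expression_str : String), Dom_determine_nested_levels_py expression_str → Spec_determine_nested_levels_py expression_str (determine_nested_levels_py expression_str)

-- ===== LEMMAS AND PROOFS =====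

-- Invariant on B's state: the stack lists (most recent first) exactly the records A's
-- backward level search would find; records above stack[0] all have level ≥ lvl, the
-- record at stack[0] has level lvl-1, and recursively below it with lvl-1.
def pvInv : List (String × Int × Int × Int) → Int → List Nat → Prop
  | recs, lvl, [] => ∀ r ∈ recs, lvl ≤ r.2.1
  | recs, lvl, j :: rest =>
      ∃ h : j < recs.length,
        recs[j].2.1 = lvl - 1 ∧
        (∀ p, (hp : p < recs.length) → j < p → lvl ≤ recs[p].2.1) ∧
        pvInv (recs.take j) (lvl - 1) rest

theorem pvFillA_none (s : List Char) (lvl i : Int)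
    (recs : List (String × Int × Int × Int))
    (h : ∀ r ∈ recs, r.2.1 ≠ lvl) :
    pvFillA s lvl i recs = (recs, false) := by
  induction recs with
  | nil => rfl
  | cons r rest ih =>
    have hrest := ih (fun x hx => h x (List.mem_cons_of_mem _ hx))
    simp [pvFillA, hrest, h r (List.mem_cons_self ..)]

theorem pvFillA_set (s : List Char) (lvl i : Int)
    (recs : List (String × Int × Int × Int)) (j : Nat) (hj : j < recs.length)
    (hlev : recs[j].2.1 = lvl)
    (habove : ∀ p, (hp : p < recs.length) → j < p → recs[p].2.1 ≠ lvl) :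
    pvFillA s lvl i recs =
      (recs.set j (String.ofList (PySem.List.slice s (some recs[j].2.2.1) (some (i + 1))),
        lvl, recs[j].2.2.1, i), true) := by
  induction recs generalizing j with
  | nil => simp at hj
  | cons r rest ih =>
    cases j with
    | zero =>
      have hrest : pvFillA s lvl i rest = (rest, false) := by
        apply pvFillA_none
        intro x hx
        obtain ⟨k, hk, rfl⟩ := List.getElem_of_mem hx
        exact habove (k + 1) (by simpa using Nat.succ_lt_succ hk) (Nat.succ_pos _)
      simp at hlev
      simp [pvFillA, hrest, hlev]
    | succ j' =>
      have hj' : j' < rest.length := by simpa using hj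
      have hrest := ih j' hj' (by simpa using hlev)
        (fun p hp hlt => habove (p + 1) (by simpa using Nat.succ_lt_succ hp) (Nat.succ_lt_succ hlt))
      simp [pvFillA, hrest]

theorem pvTake_set {α : Type} (l : List α) (j j' : Nat) (x : α) (h : j' ≤ j) :
    (l.set j x).take j' = l.take j' := by
  apply List.ext_getElem
  · simp
  · intro k hk1 hk2
    have hkj : k < j' := by
      have := hk1
      simp at this
      omega
    simp [List.getElem_set, Nat.ne_of_gt (Nat.lt_of_lt_of_le hkj h)]

-- '(' preserves the invariant
theorem pvInv_open (recs : List (String × Int × Int × Int)) (lvl : Int)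
    (stack : List Nat) (i : Int) (h : pvInv recs lvl stack) :
    pvInv (recs ++ [("", lvl, i, -1)]) (lvl + 1) (recs.length :: stack) := by
  refine ⟨by simp, by simp, ?_, ?_⟩
  · intro p hp hlt
    simp at hp
    omega
  · have : (recs ++ [("", lvl, i, -1)]).take recs.length = recs := by
      simp
    rw [this]
    simpa using h

-- ')' with empty stack preserves the invariant
theorem pvInv_close_nil (recs : List (String × Int × Int × Int)) (lvl : Int)
    (h : pvInv recs lvl []) : pvInv recs (lvl - 1) [] := by
  intro r hr
  have := h r hr
  omega

-- ')' with nonempty stack: popping preserves the invariant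
theorem pvInv_close_cons (recs : List (String × Int × Int × Int)) (lvl : Int)
    (j : Nat) (rest : List Nat) (h : pvInv recs lvl (j :: rest))
    (f : String × Int × Int × Int) (hf : f.2.1 = lvl - 1) :
    pvInv (recs.set j f) (lvl - 1) rest := by
  obtain ⟨hj, hlev, habove, hbelow⟩ := h
  cases rest with
  | nil =>
    intro r hr
    obtain ⟨k, hk, rfl⟩ := List.getElem_of_mem hr
    have hk' : k < recs.length := by simpa using hk
    rcases Nat.lt_trichotomy k j with hkj | hkj | hkj
    · have hmem : recs[k] ∈ recs.take j := by
        rw [List.mem_take_iff_getElem]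
        exact ⟨k, by simp; omega, by simp [List.getElem_take]⟩
      have := hbelow recs[k] hmem
      rw [List.getElem_set]
      simp [Nat.ne_of_gt hkj]
      omega
    · subst hkj
      rw [List.getElem_set]
      simp [hf]
    · have := habove k hk' hkj
      rw [List.getElem_set]
      simp [Nat.ne_of_lt hkj]
      omega
  | cons j' rest' =>
    obtain ⟨hj', hlev', habove', hbelow'⟩ := hbelow
    have hj'j : j' < j := by
      have := hj'
      simp [List.length_take] at this
      omega
    have hj'len : j' < recs.length := by omega
    refine ⟨by simpa using hj'len, ?_, ?_, ?_⟩
    · rw [List.getElem_set]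
      have : recs[j'] = (recs.take j)[j'] := by simp [List.getElem_take]
      simp [Nat.ne_of_gt hj'j]
      rw [this]
      exact hlev'
    · intro p hp hlt
      have hp' : p < recs.length := by simpa using hp
      rw [List.getElem_set]
      rcases Nat.lt_trichotomy p j with hpj | hpj | hpj
      · have hmem : (recs.take j)[p]'(by simp; omega) = recs[p] := by simp [List.getElem_take]
        have := habove' p (by simp; omega) hlt
        rw [hmem] at this
        simp [Nat.ne_of_gt hpj]
        omega
      · subst hpj
        simp [hf]
      · have := habove p hp' hpj
        simp [Nat.ne_of_lt hpj]
        omega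
    · rw [pvTake_set recs j j' f (Nat.le_of_lt hj'j)]
      have : recs.take j' = (recs.take j).take j' := by
        rw [List.take_take]
        simp [Nat.min_eq_left (Nat.le_of_lt hj'j)]
      rw [this]
      exact hbelow'

-- one step: A's transition equals the projection of B's, and the invariant is preserved
theorem pvStep_agree (s : List Char) (recs : List (String × Int × Int × Int))
    (lvl : Int) (stack : List Nat) (p : Int × Char) (h : pvInv recs lvl stack) :
    pvStepA s (recs, lvl) p =
      ((pvStepB s (recs, lvl, stack) p).1, (pvStepB s (recs, lvl, stack) p).2.1) ∧
    pvInv (pvStepB s (recs, lvl, stack) p).1 (pvStepB s (recs, lvl, stack) p).2.1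
      (pvStepB s (recs, lvl, stack) p).2.2 := by
  by_cases hopen : p.2 = '('
  · constructor
    · simp [pvStepA, pvStepB, hopen]
    · simp only [pvStepB, hopen, if_pos]
      have := pvInv_open recs lvl stack p.1 h
      simpa using this
  · by_cases hclose : p.2 = ')'
    · cases stack with
      | nil =>
        have hnone : pvFillA s (lvl - 1) p.1 recs = (recs, false) := by
          apply pvFillA_none
          intro r hr
          have := h r hr
          omega
        constructor
        · simp [pvStepA, pvStepB, hopen, hclose, hnone]
        · simp only [pvStepB, hopen, hclose, if_neg, if_pos]
          exact pvInv_close_nil recs lvl h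
      | cons j rest =>
        obtain ⟨hj, hlev, habove, -⟩ := id h
        have hset := pvFillA_set s (lvl - 1) p.1 recs j hj hlev
          (fun q hq hlt => by have := habove q hq hlt; omega)
        have hstart : (recs.getD j ("", 0, 0, 0)).2.2.1 = recs[j].2.2.1 := by
          simp [List.getD, List.getElem?_eq_getElem hj]
        constructor
        · simp only [pvStepA, pvStepB, hopen, hclose, if_neg, if_pos, hset, hstart]
          simp
        · simp only [pvStepB, hopen, hclose, if_neg, if_pos]
          exact pvInv_close_cons recs lvl j rest h _ rfl
    · constructor
      · simp [pvStepA, pvStepB, hopen, hclose]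
      · simpa [pvStepB, hopen, hclose] using h

theorem pvFold_agree (s : List Char) (l : List (Int × Char))
    (recs : List (String × Int × Int × Int)) (lvl : Int) (stack : List Nat)
    (h : pvInv recs lvl stack) :
    l.foldl (pvStepA s) (recs, lvl) =
      ((l.foldl (pvStepB s) (recs, lvl, stack)).1,
       (l.foldl (pvStepB s) (recs, lvl, stack)).2.1) := by
  induction l generalizing recs lvl stack with
  | nil => simp
  | cons p l ih =>
    obtain ⟨hstep, hinv⟩ := pvStep_agree s recs lvl stack p h
    simp only [List.foldl_cons, hstep]
    exact ih _ _ _ hinv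

-- ===== VERDICT (by name: the statement is the Claim_ definition above) =====
theorem determine_nested_levels_py_spec : Claim_equal_determine_nested_levels_py := by
  intro e _
  unfold Spec_determine_nested_levels_py determine_nested_levels_py determine_nested_levels_py_alt
  rw [pvFold_agree e.toList _ [] 0 [] (by intro r hr; simp at hr)]
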